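-- pv_equiv track=rewrite | github.com/yoshitag/pythonprojects | Assignment2_Template-1-2.py | is_evenodd_split
-- ===== SOURCE A (Python) =====
-- def is_evenodd_split(x, even_on_left=True):
--     digits = [int(d) for d in str(x)]
--     n = len(digits)
--     if even_on_left:
--         # check if all even numbers are on the left side and all odd numbers are on the right side
--         left, right = [], []
--         for i, d in enumerate(digits):
--             if d % 2 == 0:
--                 left.append(d)
--             else:
--                 right = digits[i:]
--                 break
--         return len(left) + len(right) == n and all(d % 2 == 0 for d in left) and all(d % 2 != 0 for d in right)
--     else:
--         # check if all odd numbers are on the left side and all even numbers are on the right side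
--         left, right = [], []
--         for i, d in enumerate(digits):
--             if d % 2 != 0:
--                 left.append(d)
--             else:
--                 right = digits[i:]
--                 break
--         return len(left) + len(right) == n and all(d % 2 != 0 for d in left) and all(d % 2 == 0 for d in right)
--
--     pass
-- ===== SOURCE B (Python) =====
-- def is_evenodd_split(x, even_on_left=True):
--     # Per-digit parity pattern ('E'/'O'); the split shape E*O* (resp. O*E*) holds
--     # exactly when the forbidden adjacent pair never occurs in the pattern.
--     pattern = ''.join('E' if int(d) % 2 == 0 else 'O' for d in str(x))
--     return ('OE' not in pattern) if even_on_left else ('EO' not in pattern)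
-- ===== Notes on version B (the rewrite author's own statement) =====
-- stated objective: simpler
-- what changed: Replaces the two enumerate/break loops with list building and three post-checks by a per-digit parity pattern string tested for absence of the single forbidden adjacent pair ('OE' or 'EO').
import Mathlib
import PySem

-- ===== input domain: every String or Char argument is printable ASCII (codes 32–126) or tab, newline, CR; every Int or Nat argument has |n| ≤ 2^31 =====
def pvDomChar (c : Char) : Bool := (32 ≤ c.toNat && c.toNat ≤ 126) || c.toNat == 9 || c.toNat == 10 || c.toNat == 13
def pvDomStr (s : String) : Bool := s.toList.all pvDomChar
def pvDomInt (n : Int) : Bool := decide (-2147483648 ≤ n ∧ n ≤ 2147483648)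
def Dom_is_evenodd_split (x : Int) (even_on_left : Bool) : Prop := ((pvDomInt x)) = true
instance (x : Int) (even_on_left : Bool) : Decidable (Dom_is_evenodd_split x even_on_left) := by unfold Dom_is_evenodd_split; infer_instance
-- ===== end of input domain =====

-- B replaces A's two enumerate/break loops (building `left`/`right` lists plus three
-- post-checks) by a per-digit parity pattern string tested for absence of one forbidden
-- adjacent pair; objective: simpler. Equivalence is claimed for x ≥ 0 (Pre_): on
-- negative x both Pythons raise ValueError at int('-').

-- ===== PORT A =====
-- digits = [int(d) for d in str(x)]; exact under Pre_ (x ≥ 0: every char of str(x) is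
-- a digit, so int(d) never raises; .getD 0 is never the raising case there)
def pvDigits (x : Int) : List Int :=
  (PySem.Int.toChars x).map (fun c => (PySem.Int.ofChars? [c]).getD 0)

-- the even_on_left loop: append even digits to left; at the first odd digit,
-- right = digits[i:] (= the current d :: rest) and break
def pvScanEven : List Int → List Int → List Int × List Int
  | [], left => (left, [])
  | d :: rest, left =>
    if PySem.Int.mod d 2 == 0 then pvScanEven rest (left ++ [d]) else (left, d :: rest)

-- the else-branch loop, parities swapped
def pvScanOdd : List Int → List Int → List Int × List Int
  | [], left => (left, [])
  | d :: rest, left =>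
    if PySem.Int.mod d 2 != 0 then pvScanOdd rest (left ++ [d]) else (left, d :: rest)

def is_evenodd_split (x : Int) (even_on_left : Bool) : Bool :=
  let digits := pvDigits x
  let n := digits.length
  if even_on_left then
    let lr := pvScanEven digits []
    (lr.1.length + lr.2.length == n) && lr.1.all (fun d => PySem.Int.mod d 2 == 0)
      && lr.2.all (fun d => PySem.Int.mod d 2 != 0)
  else
    let lr := pvScanOdd digits []
    (lr.1.length + lr.2.length == n) && lr.1.all (fun d => PySem.Int.mod d 2 != 0)
      && lr.2.all (fun d => PySem.Int.mod d 2 == 0)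

-- ===== PORT B =====
def is_evenodd_split_alt (x : Int) (even_on_left : Bool) : Bool :=
  let pattern : List Char :=
    (PySem.Int.toChars x).map
      (fun c => if PySem.Int.mod ((PySem.Int.ofChars? [c]).getD 0) 2 == 0 then 'E' else 'O')
  if even_on_left then !(PySem.Chars.isIn ['O', 'E'] pattern)
  else !(PySem.Chars.isIn ['E', 'O'] pattern)

-- ===== PRECONDITION & SPEC =====
-- Pre_ excludes negative x, on which both Pythons raise ValueError (int('-')).
def Pre_is_evenodd_split (x : Int) (even_on_left : Bool) : Prop := 0 ≤ x
instance (x : Int) (even_on_left : Bool) : Decidable (Pre_is_evenodd_split x even_on_left) := by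
  unfold Pre_is_evenodd_split; infer_instance

def pvWitness_is_evenodd_split : Int × Bool := (281, true)

def Spec_is_evenodd_split (x : Int) (even_on_left : Bool) (out : Bool) : Prop :=
  out = is_evenodd_split_alt x even_on_left
instance (x : Int) (even_on_left : Bool) (out : Bool) : Decidable (Spec_is_evenodd_split x even_on_left out) := by
  unfold Spec_is_evenodd_split; infer_instance

-- ===== CLAIM (what is proved, stated in full; the proofs are below) =====
def Claim_equal_is_evenodd_split : Prop := ∀ (x : Int) (even_on_left : Bool), Dom_is_evenodd_split x even_on_left → Pre_is_evenodd_split x even_on_left → Spec_is_evenodd_split x even_on_left (is_evenodd_split x even_on_left)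

-- ===== LEMMAS AND PROOFS =====

lemma pvScanEven_eq (ds acc : List Int) :
    pvScanEven ds acc =
      (acc ++ ds.takeWhile (fun d => PySem.Int.mod d 2 == 0),
       ds.dropWhile (fun d => PySem.Int.mod d 2 == 0)) := by
  induction ds generalizing acc with
  | nil => simp [pvScanEven]
  | cons d t ih =>
    simp [pvScanEven, ih, List.takeWhile_cons, List.dropWhile_cons]
    split <;> simp

lemma pvScanOdd_eq (ds acc : List Int) :
    pvScanOdd ds acc =
      (acc ++ ds.takeWhile (fun d => PySem.Int.mod d 2 != 0),
       ds.dropWhile (fun d => PySem.Int.mod d 2 != 0)) := by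
  induction ds generalizing acc with
  | nil => simp [pvScanOdd]
  | cons d t ih =>
    simp [pvScanOdd, ih, List.takeWhile_cons, List.dropWhile_cons]
    split <;> simp

-- in a two-letter word starting with cR, the pair [cR, cL] occurs iff cL occurs at all
lemma pvPair_infix_iff (cL cR : Char) (h : cL ≠ cR) :
    ∀ m : List Char, (∀ c ∈ m, c = cL ∨ c = cR) → ([cR, cL] <:+: cR :: m ↔ cL ∈ m) := by
  intro m
  induction m with
  | nil =>
    intro _
    simp only [List.mem_nil_iff, iff_false]
    intro hinf
    have := hinf.length_le
    simp at this
  | cons a r ih =>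
    intro hmem
    constructor
    · intro hinf
      have hcl : cL ∈ cR :: a :: r := hinf.subset (by simp)
      simp only [List.mem_cons] at hcl ⊢
      rcases hcl with h1 | h1 | h1
      · exact absurd h1 h
      · exact Or.inl h1
      · exact Or.inr h1
    · intro hcl
      rcases hmem a (by simp) with ha | ha
      · exact ⟨[], r, by simp [ha]⟩
      · have hcl' : cL ∈ r := by
          rcases List.mem_cons.mp hcl with h1 | h1
          · exact absurd (h1.trans ha) h
          · exact h1
        have hr := (ih (fun c hc => hmem c (by simp [hc]))).mpr hcl'
        exact hr.trans ⟨[cR], [], by simp [ha]⟩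

-- the forbidden pair occurs in the pattern iff some left-parity digit follows the break
lemma pvKey_iff (p : Int → Bool) (cL cR : Char) (h : cL ≠ cR) :
    ∀ ds : List Int,
      ([cR, cL] <:+: ds.map (fun d => if p d then cL else cR) ↔
        ¬ (((ds.dropWhile p).all (fun d => !(p d))) = true)) := by
  intro ds
  induction ds with
  | nil => simp
  | cons d t ih =>
    by_cases hp : p d = true
    · simp only [List.map_cons, if_pos, List.dropWhile_cons, hp]
      rw [List.infix_cons_iff]
      have hpre : ¬ ([cR, cL] <+: cL :: t.map (fun d => if p d then cL else cR)) := by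
        rw [List.cons_prefix_cons]
        rintro ⟨h1, -⟩
        exact h h1.symm
      simpa [hpre] using ih
    · have hpf : p d = false := by simpa using hp
      have hmem : ∀ c ∈ t.map (fun d => if p d then cL else cR), c = cL ∨ c = cR := by
        intro c hc
        rcases List.mem_map.mp hc with ⟨y, -, hy⟩
        by_cases hpy : p y = true <;> simp [hpy] at hy <;> simp [← hy]
      simp only [List.map_cons, List.dropWhile_cons, hpf, Bool.false_eq_true, if_false]
      rw [pvPair_infix_iff cL cR h _ hmem]
      simp only [List.mem_map, List.all_cons, hp, Bool.not_false, Bool.true_and,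
        List.all_eq_true]
      constructor
      · rintro ⟨y, hy, hite⟩
        intro hall
        have := hall y hy
        split at hite
        · simp_all
        · exact h hite.symm
      · intro hnall
        push Not at hnall
        rcases hnall with ⟨y, hy, hny⟩
        refine ⟨y, hy, ?_⟩
        have : p y = true := by
          cases hpy : p y
          · exact absurd (by simp [hpy]) hny
          · rfl
        simp [this]

lemma pvKey (p : Int → Bool) (cL cR : Char) (h : cL ≠ cR) (ds : List Int) :
    ((ds.dropWhile p).all (fun d => !(p d))) =
      !(PySem.Chars.isIn [cR, cL] (ds.map (fun d => if p d then cL else cR))) := by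
  by_cases hin : PySem.Chars.isIn [cR, cL] (ds.map (fun d => if p d then cL else cR)) = true
  · have := (pvKey_iff p cL cR h ds).mp ((PySem.Chars.isIn_iff_infix _ _).mp hin)
    simp [hin] at this ⊢
    exact this
  · have hninf : ¬ ([cR, cL] <:+: ds.map (fun d => if p d then cL else cR)) :=
      fun hinf => hin ((PySem.Chars.isIn_iff_infix _ _).mpr hinf)
    have hfalse : PySem.Chars.isIn [cR, cL] (ds.map (fun d => if p d then cL else cR)) = false := by
      simpa using hin
    have hLHS : ((ds.dropWhile p).all (fun d => !(p d))) = true := by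
      by_contra hc
      exact hninf ((pvKey_iff p cL cR h ds).mpr hc)
    rw [hLHS, hfalse]
    rfl

lemma pvLenSplit (p : Int → Bool) (ds : List Int) :
    (ds.takeWhile p).length + (ds.dropWhile p).length = ds.length := by
  rw [← List.length_append, List.takeWhile_append_dropWhile]

-- ===== VERDICT (by name: the statement is the Claim_ definition above) =====
theorem is_evenodd_split_spec : Claim_equal_is_evenodd_split := by
  intro x e _ _
  unfold Spec_is_evenodd_split is_evenodd_split is_evenodd_split_alt
  have hpat :
      ((PySem.Int.toChars x).map
          (fun c => if PySem.Int.mod ((PySem.Int.ofChars? [c]).getD 0) 2 == 0 then 'E' else 'O'))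
        = (pvDigits x).map (fun d => if PySem.Int.mod d 2 == 0 then 'E' else 'O') := by
    simp [pvDigits, List.map_map, Function.comp]
  rw [hpat]
  cases e with
  | true =>
    simp only [if_true]
    rw [pvScanEven_eq]
    simp only [List.nil_append]
    have hlen : (((pvDigits x).takeWhile (fun d => PySem.Int.mod d 2 == 0)).length
        + ((pvDigits x).dropWhile (fun d => PySem.Int.mod d 2 == 0)).length
        == (pvDigits x).length) = true := by
      simp [pvLenSplit]
    rw [hlen, List.all_takeWhile]
    simp only [Bool.true_and]
    have hb : (fun d => PySem.Int.mod d 2 != 0) = (fun d => !(PySem.Int.mod d 2 == 0)) := rfl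
    rw [hb, pvKey (fun d => PySem.Int.mod d 2 == 0) 'E' 'O' (by decide) (pvDigits x)]
  | false =>
    simp only [Bool.false_eq_true, if_false]
    rw [pvScanOdd_eq]
    simp only [List.nil_append]
    have hlen : (((pvDigits x).takeWhile (fun d => PySem.Int.mod d 2 != 0)).length
        + ((pvDigits x).dropWhile (fun d => PySem.Int.mod d 2 != 0)).length
        == (pvDigits x).length) = true := by
      simp [pvLenSplit]
    rw [hlen, List.all_takeWhile]
    simp only [Bool.true_and]
    have hb : (fun d => PySem.Int.mod d 2 == 0) = (fun d => !(PySem.Int.mod d 2 != 0)) := by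
      funext d
      have hm : PySem.Int.mod d 2 = d % 2 := PySem.Int.mod_eq_emod_of_pos (by omega)
      cases h : PySem.Int.mod d 2 == 0 <;> rw [hm] at h <;> simp at h <;>
        simp [bne, h]
    rw [hb, pvKey (fun d => PySem.Int.mod d 2 != 0) 'O' 'E' (by decide) (pvDigits x)]
    have hmap : ((pvDigits x).map (fun d => if PySem.Int.mod d 2 != 0 then 'O' else 'E'))
        = (pvDigits x).map (fun d => if PySem.Int.mod d 2 == 0 then 'E' else 'O') := by
      apply List.map_congr_left
      intro d _
      have hm : PySem.Int.mod d 2 = d % 2 := PySem.Int.mod_eq_emod_of_pos (by omega)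
      cases h : PySem.Int.mod d 2 == 0 <;> rw [hm] at h <;> simp at h <;>
        simp [bne, h]
    rw [hmap]
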